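-- pv_equiv track=rewrite | github.com/Alan007-hub/Interpreter | scanner.py | findpos
-- ===== SOURCE A (Python) =====
-- def findpos(s, line):
--     inbrackets=0
--     j=-1
--     for i in line:
--         j+=1
--         if i is '(':
--             inbrackets+=1
--         elif i is ')':
--             inbrackets-=1
--         elif inbrackets!=0: # so this is going to search for the enclosed brackets. If inbrackets != 0 then, it is going to search for it til it does
--             continue # so when the input is 3*(..)it prints out * first even though it is at last in precedence. For symbols like +-/ it never goes beyond this point
--         elif i is s:
--             return j
--     return -1
-- ===== SOURCE B (Python) =====
-- def findpos(s, line):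
--     # Pass 1: bracket depth immediately BEFORE each position.
--     depth = [0]
--     d = 0
--     for c in line:
--         d += 1 if c == '(' else -1 if c == ')' else 0
--         depth.append(d)
--     # Pass 2: first non-bracket char at depth 0 equal to s.
--     for j, c in enumerate(line):
--         if c not in '()' and depth[j] == 0 and c == s:
--             return j
--     return -1
-- ===== Notes on version B (the rewrite author's own statement) =====
-- stated objective: alternative
-- what changed: Replaces A's single interleaved loop (running bracket counter checked mid-loop with early return) by two separate passes: first a prefix-sum table of bracket depth before each position, then a search over enumerate for the first non-bracket char at depth 0 equal to s.
import Mathlib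
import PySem

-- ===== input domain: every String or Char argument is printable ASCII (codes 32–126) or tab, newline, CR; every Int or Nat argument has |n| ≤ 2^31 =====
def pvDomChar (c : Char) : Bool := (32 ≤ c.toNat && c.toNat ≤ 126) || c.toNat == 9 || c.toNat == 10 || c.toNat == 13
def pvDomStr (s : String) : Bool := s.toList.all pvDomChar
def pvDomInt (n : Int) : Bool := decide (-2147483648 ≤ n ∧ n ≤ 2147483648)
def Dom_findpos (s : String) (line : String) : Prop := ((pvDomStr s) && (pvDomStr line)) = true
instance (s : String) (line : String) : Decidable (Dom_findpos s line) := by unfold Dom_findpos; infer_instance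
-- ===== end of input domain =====

-- B = two-pass depth-table search instead of A's interleaved counter loop; alternative decomposition, same cost.
-- Python's `i is s` on single interned ASCII chars behaves as equality; ported as equality.

-- ===== PORT A =====
-- A's loop: running `inbrackets` counter and index j, early return on the first hit.
def findposAux (s : String) : List Char → Int → Int → Int
  | [], _, _ => -1
  | i :: rest, inbrackets, j =>
    if i = '(' then findposAux s rest (inbrackets + 1) (j + 1)
    else if i = ')' then findposAux s rest (inbrackets - 1) (j + 1)
    else if inbrackets ≠ 0 then findposAux s rest inbrackets (j + 1)
    else if String.mk [i] = s then j + 1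
    else findposAux s rest inbrackets (j + 1)

def findpos (s : String) (line : String) : Int :=
  findposAux s line.toList 0 (-1)

-- ===== PORT B =====
-- Pass 1 of Source B: depth = [0]; for c in line: d += δ(c); depth.append(d)
def altStep (st : List Int × Int) (c : Char) : List Int × Int :=
  let d := st.2 + (if c = '(' then 1 else if c = ')' then -1 else 0)
  (st.1 ++ [d], d)

-- Pass 2 of Source B: enumerate(line), depth[j] is always in range so getD is exact here
def altEnumFrom : Nat → List Char → List (Nat × Char)
  | _, [] => []
  | k, c :: cs => (k, c) :: altEnumFrom (k + 1) cs

def altSearch (s : String) (depth : List Int) : List (Nat × Char) → Int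
  | [] => -1
  | (j, c) :: rest =>
    if (c ≠ '(' ∧ c ≠ ')') ∧ depth.getD j 0 = 0 ∧ String.mk [c] = s then (j : Int)
    else altSearch s depth rest

def findpos_alt (s : String) (line : String) : Int :=
  let depth := (line.toList.foldl altStep ([0], 0)).1
  altSearch s depth (altEnumFrom 0 line.toList)

-- ===== PRECONDITION & SPEC =====
def Spec_findpos (s : String) (line : String) (out : Int) : Prop := out = findpos_alt s line
instance (s : String) (line : String) (out : Int) : Decidable (Spec_findpos s line out) := by unfold Spec_findpos; infer_instance

-- ===== CLAIM (what is proved, stated in full; the proofs are below) =====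
def Claim_equal_findpos : Prop := ∀ (s : String) (line : String), Dom_findpos s line → Spec_findpos s line (findpos s line)

-- ===== LEMMAS AND PROOFS =====

-- the "ideal" depth list: depth before each position, plus the final depth
def depthsList : List Char → Int → List Int
  | [], d => [d]
  | c :: cs, d => d :: depthsList cs (d + (if c = '(' then 1 else if c = ')' then -1 else 0))

lemma foldl_altStep (cs : List Char) : ∀ (pre : List Int) (d : Int),
    (cs.foldl altStep (pre ++ [d], d)).1 = pre ++ depthsList cs d := by
  induction cs with
  | nil => intro pre d; simp [depthsList]
  | cons c cs ih =>
    intro pre d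
    have h : altStep (pre ++ [d], d) c =
        ((pre ++ [d]) ++ [d + (if c = '(' then 1 else if c = ')' then -1 else 0)],
          d + (if c = '(' then 1 else if c = ')' then -1 else 0)) := by
      simp [altStep]
    simp only [List.foldl_cons, h, ih]
    simp [depthsList]

lemma drop_getD (D : List Int) (k : Nat) (x : Int) (t : List Int)
    (h : D.drop k = x :: t) : D.getD k 0 = x := by
  have h1 : (D.drop k)[0]? = D[k + 0]? := List.getElem?_drop
  rw [h] at h1
  simp only [List.getElem?_cons_zero, Nat.add_zero] at h1
  simp [List.getD, ← h1]

lemma drop_succ_of_drop (D : List Int) (k : Nat) (x : Int) (t : List Int)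
    (h : D.drop k = x :: t) : D.drop (k + 1) = t := by
  have : D.drop (k + 1) = (D.drop k).drop 1 := by
    rw [List.drop_drop]
  simp [this, h]

lemma key (s : String) : ∀ (cs : List Char) (d : Int) (k : Nat) (D : List Int),
    D.drop k = depthsList cs d →
    findposAux s cs d ((k : Int) - 1) = altSearch s D (altEnumFrom k cs) := by
  intro cs
  induction cs with
  | nil => intro d k D _; simp [findposAux, altEnumFrom, altSearch]
  | cons c cs ih =>
    intro d k D hD
    have hD' : D.drop k = d :: depthsList cs (d + (if c = '(' then 1 else if c = ')' then -1 else 0)) := by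
      simpa [depthsList] using hD
    have hget : D.getD k 0 = d := drop_getD D k _ _ hD'
    have hnext : D.drop (k + 1) = depthsList cs (d + (if c = '(' then 1 else if c = ')' then -1 else 0)) :=
      drop_succ_of_drop D k _ _ hD'
    have harg : ((k : Int) - 1) + 1 = ((k + 1 : Nat) : Int) - 1 := by push_cast; ring
    simp only [findposAux, altEnumFrom, altSearch]
    by_cases hop : c = '('
    · rw [if_pos hop, if_neg (by simp [hop]), harg,
        ih (d + 1) (k + 1) D (by simpa [hop] using hnext)]
    · by_cases hcl : c = ')'
      · rw [if_neg hop, if_pos hcl, if_neg (by simp [hcl]), harg,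
          ih (d - 1) (k + 1) D (by simpa [hop, hcl, sub_eq_add_neg] using hnext)]
      · have hnext0 : D.drop (k + 1) = depthsList cs d := by
          simpa [hop, hcl] using hnext
        by_cases hd : d = 0
        · subst hd
          by_cases hs : String.mk [c] = s
          · rw [if_neg hop, if_neg hcl, if_neg (by simp), if_pos hs,
              if_pos ⟨⟨hop, hcl⟩, hget, hs⟩]
            omega
          · rw [if_neg hop, if_neg hcl, if_neg (by simp), if_neg hs,
              if_neg (by rintro ⟨-, -, h⟩; exact hs h), harg, ih 0 (k + 1) D hnext0]
        · rw [if_neg hop, if_neg hcl, if_pos hd,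
            if_neg (by rintro ⟨-, h, -⟩; exact hd (hget ▸ h)), harg, ih d (k + 1) D hnext0]

-- ===== VERDICT (by name: the statement is the Claim_ definition above) =====
theorem findpos_spec : Claim_equal_findpos := by
  intro s line _
  unfold Spec_findpos findpos findpos_alt
  have hfold : (line.toList.foldl altStep ([0], 0)).1 = depthsList line.toList 0 := by
    simpa using foldl_altStep line.toList [] 0
  rw [hfold]
  have := key s line.toList 0 0 (depthsList line.toList 0) (by simp)
  simpa using this
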